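-- pv_equiv track=rewrite | github.com/AnnaVitkina/Mismatch_customization | vocabulary.py | _user_mapped_etof_column
-- ===== SOURCE A (Python) =====
-- from typing import Dict, List, Optional, Tuple
--
-- ETOF_TO_RATE_CARD_MAPPING = {
--     'Invoice type': 'INV_TYPE',
--     'Lane Type': 'ORIGINAL_SERVICE',
--     'Carrier Account Number': 'Billing account',
--     'Shipping Condition': 'INVOICE_ENTITY',
--     'Carrier Name': 'CARRIER_NAME',
-- }
--
-- def _user_mapped_etof_column(rate_card_col: str) -> Optional[str]:
--     """
--     Resolve ETOF column from :data:`ETOF_TO_RATE_CARD_MAPPING`.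
--     Matches rate card keys with **strip** and **case-insensitive** comparison so
--     ``Carrier Name`` overrides fuzzy mapping to ``Carrier agreement #`` reliably.
--     """
--     if not ETOF_TO_RATE_CARD_MAPPING or rate_card_col is None:
--         return None
--     rc = str(rate_card_col).strip()
--     if rc in ETOF_TO_RATE_CARD_MAPPING:
--         return ETOF_TO_RATE_CARD_MAPPING[rc]
--     rcl = rc.lower()
--     for k, v in ETOF_TO_RATE_CARD_MAPPING.items():
--         if str(k).strip().lower() == rcl:
--             return v
--     return None
-- ===== SOURCE B (Python) =====
-- from typing import Dict, List, Optional, Tuple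
--
-- ETOF_TO_RATE_CARD_MAPPING = {
--     'Invoice type': 'INV_TYPE',
--     'Lane Type': 'ORIGINAL_SERVICE',
--     'Carrier Account Number': 'Billing account',
--     'Shipping Condition': 'INVOICE_ENTITY',
--     'Carrier Name': 'CARRIER_NAME',
-- }
--
-- def _resolve(items, target):
--     # Structural recursion over the remaining (key, value) pairs: first
--     # normalized match wins.
--     if not items:
--         return None
--     (k, v) = items[0]
--     if str(k).strip().lower() == target:
--         return v
--     return _resolve(items[1:], target)
--
-- def _user_mapped_etof_column(rate_card_col):
--     # Single recursive normalized pass: the exact-match branch of A is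
--     # subsumed, since an exact key match is also a strip+lower match and the
--     # mapping's keys are unique case-insensitively.
--     if not ETOF_TO_RATE_CARD_MAPPING or rate_card_col is None:
--         return None
--     return _resolve(list(ETOF_TO_RATE_CARD_MAPPING.items()),
--                     str(rate_card_col).strip().lower())
-- ===== Notes on version B (the rewrite author's own statement) =====
-- stated objective: simpler
-- what changed: Replaces A's two-stage exact-membership-then-linear-scan with one recursive normalized pass over the items list: a single strip+lower comparison per key, no exact-match branch (correct because the mapping's keys are pairwise distinct case-insensitively, so an exact hit and the first normalized hit coincide).
import Mathlib
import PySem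

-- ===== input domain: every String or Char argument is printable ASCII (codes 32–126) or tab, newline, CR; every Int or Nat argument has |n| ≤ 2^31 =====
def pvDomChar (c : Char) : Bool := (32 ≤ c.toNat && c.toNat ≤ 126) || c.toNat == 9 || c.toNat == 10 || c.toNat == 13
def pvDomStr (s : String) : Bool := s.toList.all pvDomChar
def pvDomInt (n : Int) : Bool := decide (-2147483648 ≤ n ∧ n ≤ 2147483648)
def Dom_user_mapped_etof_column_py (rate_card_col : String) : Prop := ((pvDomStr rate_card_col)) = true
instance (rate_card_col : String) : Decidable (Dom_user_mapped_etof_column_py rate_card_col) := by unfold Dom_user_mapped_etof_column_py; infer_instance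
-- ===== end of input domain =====

-- B replaces A's two-stage exact-membership-then-scan with one recursive normalized pass
-- over the mapping's items (objective: simpler; valid because the keys are unique
-- case-insensitively, so an exact hit and the first normalized hit coincide).

def ETOF_TO_RATE_CARD_MAPPING : PySem.Dict String String :=
  PySem.Dict.ofList [("Invoice type", "INV_TYPE"), ("Lane Type", "ORIGINAL_SERVICE"),
    ("Carrier Account Number", "Billing account"), ("Shipping Condition", "INVOICE_ENTITY"),
    ("Carrier Name", "CARRIER_NAME")]

-- ===== PORT A =====
-- ('rate_card_col is None' can never fire for a str argument and is not represented)
def user_mapped_etof_column_py (rate_card_col : String) : Option String :=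
  if ETOF_TO_RATE_CARD_MAPPING.items.isEmpty then none
  else
    let rc := PySem.Str.strip rate_card_col
    if ETOF_TO_RATE_CARD_MAPPING.contains rc then ETOF_TO_RATE_CARD_MAPPING.get? rc
    else
      let rcl := PySem.Str.lower rc
      (ETOF_TO_RATE_CARD_MAPPING.items.find? (fun kv => PySem.Str.lower (PySem.Str.strip kv.1) == rcl)).map (·.2)

-- ===== PORT B =====
-- recursive helper _resolve: first normalized match in the remaining items wins
def etof_resolve : List (String × String) → String → Option String
  | [], _ => none
  | (k, v) :: rest, target =>
    if PySem.Str.lower (PySem.Str.strip k) == target then some v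
    else etof_resolve rest target

def user_mapped_etof_column_py_alt (rate_card_col : String) : Option String :=
  if ETOF_TO_RATE_CARD_MAPPING.items.isEmpty then none
  else etof_resolve ETOF_TO_RATE_CARD_MAPPING.items
        (PySem.Str.lower (PySem.Str.strip rate_card_col))

-- ===== PRECONDITION & SPEC =====
def Spec_user_mapped_etof_column_py (rate_card_col : String) (out : Option String) : Prop := out = user_mapped_etof_column_py_alt rate_card_col
instance (rate_card_col : String) (out : Option String) : Decidable (Spec_user_mapped_etof_column_py rate_card_col out) := by unfold Spec_user_mapped_etof_column_py; infer_instance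

-- ===== CLAIM (what is proved, stated in full; the proofs are below) =====
def Claim_equal_user_mapped_etof_column_py : Prop := ∀ (rate_card_col : String), Dom_user_mapped_etof_column_py rate_card_col → Spec_user_mapped_etof_column_py rate_card_col (user_mapped_etof_column_py rate_card_col)

-- ===== LEMMAS AND PROOFS =====

-- B's recursion computes the first normalized match, i.e. A's find?-scan
theorem etof_resolve_eq_find (items : List (String × String)) (t : String) :
    etof_resolve items t
      = (items.find? (fun kv => PySem.Str.lower (PySem.Str.strip kv.1) == t)).map (·.2) := by
  induction items with
  | nil => rfl
  | cons kv rest ih =>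
    obtain ⟨k, v⟩ := kv
    by_cases h : (PySem.Str.lower (PySem.Str.strip k) == t) = true
    · simp [etof_resolve, h]
    · simp only [Bool.not_eq_true] at h
      simp [etof_resolve, h, ih]

theorem etof_ports_agree (s : String) :
    user_mapped_etof_column_py s = user_mapped_etof_column_py_alt s := by
  unfold user_mapped_etof_column_py user_mapped_etof_column_py_alt
  by_cases h1 : PySem.Str.strip s = "Invoice type"
  · rw [h1]; decide
  · by_cases h2 : PySem.Str.strip s = "Lane Type"
    · rw [h2]; decide
    · by_cases h3 : PySem.Str.strip s = "Carrier Account Number"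
      · rw [h3]; decide
      · by_cases h4 : PySem.Str.strip s = "Shipping Condition"
        · rw [h4]; decide
        · by_cases h5 : PySem.Str.strip s = "Carrier Name"
          · rw [h5]; decide
          · -- rc matches no key exactly: A's scan and B's recursion are the same pass
            have hk : ETOF_TO_RATE_CARD_MAPPING.keys = ["Invoice type", "Lane Type",
                "Carrier Account Number", "Shipping Condition", "Carrier Name"] := by decide
            have hc : ETOF_TO_RATE_CARD_MAPPING.contains (PySem.Str.strip s) = false := by
              rw [PySem.Dict.contains_eq_decide_mem_keys, hk]
              simp [h1, h2, h3, h4, h5]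
            simp only [hc, Bool.false_eq_true, if_false, etof_resolve_eq_find]

-- ===== VERDICT (by name: the statement is the Claim_ definition above) =====
theorem user_mapped_etof_column_py_spec : Claim_equal_user_mapped_etof_column_py := by
  intro s _
  unfold Spec_user_mapped_etof_column_py
  exact etof_ports_agree s
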